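-- pv_equiv track=rewrite | github.com/Nikololoshka/StankinScheduleEditor3 | parser/parser.py | _detect_block_time
-- ===== SOURCE A (Python) =====
-- def _detect_block_time(start_block: int, end_block: int, time_blocks: list):
--     start_delta = 100_000
--     start_time = ''
--
--     end_delta = 100_000
--     end_time = ''
--
--     for (start_text, end_text), start, end in time_blocks:
--         if abs(start_block - start) < start_delta:
--             start_delta = abs(start_block - start)
--             start_time = start_text
--
--         if abs(end_block - end) < end_delta and end_block - end < 10:
--             end_delta = abs(end_block - end)
--             end_time = end_text
--
--     return start_time, end_time
-- ===== SOURCE B (Python) =====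
-- def _detect_block_time(start_block: int, end_block: int, time_blocks: list):
--     MAX_DELTA = 100_000  # deltas at or beyond this are never considered a match
--
--     start_candidates = [b for b in time_blocks if abs(start_block - b[1]) < MAX_DELTA]
--     start_time = (min(start_candidates, key=lambda b: abs(start_block - b[1]))[0][0]
--                   if start_candidates else '')
--
--     end_candidates = [b for b in time_blocks
--                       if end_block - b[2] < 10 and abs(end_block - b[2]) < MAX_DELTA]
--     end_time = (min(end_candidates, key=lambda b: abs(end_block - b[2]))[0][1]
--                 if end_candidates else '')
--
--     return start_time, end_time
-- ===== Notes on version B (the rewrite author's own statement) =====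
-- stated objective: idiomatic
-- what changed: Replaced the fused four-accumulator loop with two independent declarative passes: filter the candidates for each bound, then min(key=abs delta) (first-minimum tie-break) with '' when no candidate exists.
import Mathlib
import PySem

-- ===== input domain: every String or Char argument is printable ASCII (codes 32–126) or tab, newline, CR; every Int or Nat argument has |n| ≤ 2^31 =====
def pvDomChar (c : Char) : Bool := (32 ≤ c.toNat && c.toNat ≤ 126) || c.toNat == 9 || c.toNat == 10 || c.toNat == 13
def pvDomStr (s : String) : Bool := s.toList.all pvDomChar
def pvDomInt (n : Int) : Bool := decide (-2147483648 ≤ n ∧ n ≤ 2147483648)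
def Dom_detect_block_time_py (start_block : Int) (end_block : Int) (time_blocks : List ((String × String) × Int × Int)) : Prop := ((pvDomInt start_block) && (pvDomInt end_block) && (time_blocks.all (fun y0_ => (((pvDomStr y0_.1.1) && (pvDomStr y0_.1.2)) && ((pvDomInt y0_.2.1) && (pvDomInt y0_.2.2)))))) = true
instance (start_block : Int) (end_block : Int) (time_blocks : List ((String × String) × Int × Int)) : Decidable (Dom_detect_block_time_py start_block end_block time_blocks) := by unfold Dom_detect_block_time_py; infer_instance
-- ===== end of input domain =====

-- B replaces A's fused four-accumulator loop with two independent filter-then-min passes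
-- (same first-minimum tie-break, '' when no candidate); idiomatic decomposition, not faster.

-- ===== PORT A =====
-- A's single loop; the four Python variables (start_delta, start_time, end_delta, end_time)
-- are carried as a pair of pairs ((start_delta, start_time), (end_delta, end_time)).
def detect_block_time_py (start_block : Int) (end_block : Int) (time_blocks : List ((String × String) × Int × Int)) : String × String :=
  let r := time_blocks.foldl
    (fun (acc : (Int × String) × (Int × String)) b =>
      ((if |start_block - b.2.1| < acc.1.1 then (|start_block - b.2.1|, b.1.1) else acc.1),
       (if |end_block - b.2.2| < acc.2.1 ∧ end_block - b.2.2 < 10 then (|end_block - b.2.2|, b.1.2) else acc.2)))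
    ((100000, ""), (100000, ""))
  (r.1.2, r.2.2)

-- ===== PORT B =====
def detect_block_time_py_alt (start_block : Int) (end_block : Int) (time_blocks : List ((String × String) × Int × Int)) : String × String :=
  let start_candidates := time_blocks.filter (fun b => decide (|start_block - b.2.1| < 100000))
  let start_time := match PySem.List.min? start_candidates (fun b => |start_block - b.2.1|) with
    | some m => m.1.1
    | none => ""
  let end_candidates := time_blocks.filter
    (fun b => decide (end_block - b.2.2 < 10) && decide (|end_block - b.2.2| < 100000))
  let end_time := match PySem.List.min? end_candidates (fun b => |end_block - b.2.2|) with
    | some m => m.1.2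
    | none => ""
  (start_time, end_time)

-- ===== PRECONDITION & SPEC =====
def Spec_detect_block_time_py (start_block : Int) (end_block : Int) (time_blocks : List ((String × String) × Int × Int)) (out : String × String) : Prop := out = detect_block_time_py_alt start_block end_block time_blocks
instance (start_block : Int) (end_block : Int) (time_blocks : List ((String × String) × Int × Int)) (out : String × String) : Decidable (Spec_detect_block_time_py start_block end_block time_blocks out) := by unfold Spec_detect_block_time_py; infer_instance

-- ===== CLAIM (what is proved, stated in full; the proofs are below) =====
def Claim_equal_detect_block_time_py : Prop := ∀ (start_block : Int) (end_block : Int) (time_blocks : List ((String × String) × Int × Int)), Dom_detect_block_time_py start_block end_block time_blocks → Spec_detect_block_time_py start_block end_block time_blocks (detect_block_time_py start_block end_block time_blocks)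

-- ===== LEMMAS AND PROOFS =====

-- splitting a componentwise paired fold into two folds
theorem pv_foldl_split {α σ τ : Type} (xs : List α) (fs : σ → α → σ) (fe : τ → α → τ)
    (s0 : σ) (e0 : τ) :
    xs.foldl (fun acc b => (fs acc.1 b, fe acc.2 b)) (s0, e0) = (xs.foldl fs s0, xs.foldl fe e0) := by
  induction xs generalizing s0 e0 with
  | nil => rfl
  | cons x xs ih => simp [List.foldl_cons, ih]

-- min?'s fold, once seeded, is the plain running-min fold
theorem pv_min?_foldl_some {α : Type} (k : α → Int) (xs : List α) (m : α) :
    xs.foldl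
      (fun acc x =>
        match acc with
        | none => some x
        | some m => if k x < k m then some x else some m)
      (some m)
    = some (xs.foldl (fun m x => if k x < k m then x else m) m) := by
  induction xs generalizing m with
  | nil => rfl
  | cons x xs ih =>
    simp only [List.foldl_cons]
    by_cases h : k x < k m <;> simp [h, ih]

theorem pv_min?_cons {α : Type} (k : α → Int) (b : α) (l : List α) :
    PySem.List.min? (b :: l) k = some (l.foldl (fun m x => if k x < k m then x else m) b) := by
  simp only [PySem.List.min?, List.foldl_cons]
  exact pv_min?_foldl_some k l b

-- elements filtered out by the threshold can never win the running min
theorem pv_filter_min {α : Type} (k : α → Int) (c : α → Bool) (xs : List α) (m : α) (d : Int)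
    (hm : k m < d) :
    xs.foldl (fun m x => if k x < k m ∧ c x = true then x else m) m
      = (xs.filter (fun b => c b && decide (k b < d))).foldl
          (fun m x => if k x < k m then x else m) m := by
  induction xs generalizing m with
  | nil => rfl
  | cons x xs ih =>
    simp only [List.foldl_cons, List.filter_cons]
    by_cases hc : c x = true
    · by_cases hx : k x < k m
      · have hxd : k x < d := lt_trans hx hm
        simp [hc, hx, hxd, List.foldl_cons, ih _ (lt_of_lt_of_le hxd (le_refl d)) ]
      · by_cases hxd : k x < d
        · simp [hc, hx, hxd, List.foldl_cons, ih _ hm]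
        · simp [hc, hx, hxd, ih _ hm]
    · simp [hc, ih _ hm]

-- once an element is accepted, the fused accumulator is the running min paired with its text
theorem pv_fold_seeded {α : Type} (k : α → Int) (f : α → String) (c : α → Bool)
    (xs : List α) (b : α) :
    xs.foldl (fun (acc : Int × String) x => if k x < acc.1 ∧ c x = true then (k x, f x) else acc)
      (k b, f b)
    = ((k (xs.foldl (fun m x => if k x < k m ∧ c x = true then x else m) b)),
       f (xs.foldl (fun m x => if k x < k m ∧ c x = true then x else m) b)) := by
  induction xs generalizing b with
  | nil => rfl
  | cons x xs ih =>
    simp only [List.foldl_cons]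
    by_cases h : k x < k b ∧ c x = true <;> simp [h, ih]

-- main characterisation: A's threshold accumulator = min? over the filtered candidates
theorem pv_main {α : Type} (k : α → Int) (f : α → String) (c : α → Bool)
    (xs : List α) (d : Int) (t : String) :
    xs.foldl (fun (acc : Int × String) x => if k x < acc.1 ∧ c x = true then (k x, f x) else acc)
      (d, t)
    = (match PySem.List.min? (xs.filter (fun b => c b && decide (k b < d))) k with
       | some m => (k m, f m)
       | none => (d, t)) := by
  induction xs generalizing d t with
  | nil => simp [PySem.List.min?]
  | cons x xs ih =>
    simp only [List.foldl_cons, List.filter_cons]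
    by_cases hc : c x = true
    · by_cases hx : k x < d
      · simp only [hc, hx, and_self, if_true, decide_true, Bool.and_true]
        rw [pv_fold_seeded k f c xs x, pv_filter_min k c xs x d hx, pv_min?_cons]
      · simp [hc, hx, ih]
    · simp [hc, ih]

-- ===== VERDICT (by name: the statement is the Claim_ definition above) =====
theorem detect_block_time_py_spec : Claim_equal_detect_block_time_py := by
  intro sb eb tbs _
  show detect_block_time_py sb eb tbs = detect_block_time_py_alt sb eb tbs
  simp only [detect_block_time_py, detect_block_time_py_alt]
  rw [pv_foldl_split tbs
        (fun p b => if |sb - b.2.1| < p.1 then (|sb - b.2.1|, b.1.1) else p)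
        (fun p b => if |eb - b.2.2| < p.1 ∧ eb - b.2.2 < 10 then (|eb - b.2.2|, b.1.2) else p)
        (100000, "") (100000, "")]
  have hs := pv_main (fun b : (String × String) × Int × Int => |sb - b.2.1|) (fun b => b.1.1)
      (fun _ => true) tbs 100000 ""
  have he := pv_main (fun b : (String × String) × Int × Int => |eb - b.2.2|) (fun b => b.1.2)
      (fun b => decide (eb - b.2.2 < 10)) tbs 100000 ""
  simp only [and_true, Bool.true_and, decide_eq_true_eq] at hs he
  rw [hs, he]
  cases h1 : PySem.List.min? (tbs.filter fun b => decide (|sb - b.2.1| < 100000))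
      (fun b => |sb - b.2.1|) <;>
    cases h2 : PySem.List.min? (tbs.filter fun b => decide (eb - b.2.2 < 10) && decide (|eb - b.2.2| < 100000))
      (fun b => |eb - b.2.2|) <;> simp
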